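-- pv_equiv track=rewrite | github.com/nitsanavni/katas | render-refactoring-diff/git_diff_to_html.py | convert_diff_to_html
-- ===== SOURCE A (Python) =====
-- def convert_diff_to_html(diff_input):
--     diff_input = diff_input.strip()
--     html_output = ['<pre style="color: gray">']
--
--     for line in diff_input.splitlines():
--         converted_line = line
--         # Handle deletions marked by [- -]
--         converted_line = converted_line.replace(
--             '[-', '<s style="color: red">').replace('-]', '</s>')
--         # Handle additions marked by {+ +}
--         converted_line = converted_line.replace(
--             '{+', '<b style="color: green">').replace('+}', '</b>')
--         html_output.append(converted_line)
--
--     html_output.append('</pre>')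
--     return '\n'.join(html_output)
-- ===== SOURCE B (Python) =====
-- MAP = {
--     '[-': '<s style="color: red">',
--     '-]': '</s>',
--     '{+': '<b style="color: green">',
--     '+}': '</b>',
-- }
--
--
-- def _substitute(line):
--     # single left-to-right pass with a token table instead of four replace scans
--     out = []
--     i = 0
--     n = len(line)
--     while i < n:
--         rep = MAP.get(line[i:i + 2])
--         if rep is not None:
--             out.append(rep)
--             i += 2
--         else:
--             out.append(line[i])
--             i += 1
--     return ''.join(out)
--
--
-- def convert_diff_to_html(diff_input):
--     lines = diff_input.strip().splitlines()
--     parts = ['<pre style="color: gray">'] + [_substitute(line) for line in lines] + ['</pre>']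
--     return '\n'.join(parts)
-- ===== Notes on version B (the rewrite author's own statement) =====
-- stated objective: alternative
-- what changed: B replaces A's four sequential full-string .replace passes per line with a single left-to-right scan that looks each two-character window up in a marker-to-tag table, emitting the replacement or the character as it goes.
import Mathlib
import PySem

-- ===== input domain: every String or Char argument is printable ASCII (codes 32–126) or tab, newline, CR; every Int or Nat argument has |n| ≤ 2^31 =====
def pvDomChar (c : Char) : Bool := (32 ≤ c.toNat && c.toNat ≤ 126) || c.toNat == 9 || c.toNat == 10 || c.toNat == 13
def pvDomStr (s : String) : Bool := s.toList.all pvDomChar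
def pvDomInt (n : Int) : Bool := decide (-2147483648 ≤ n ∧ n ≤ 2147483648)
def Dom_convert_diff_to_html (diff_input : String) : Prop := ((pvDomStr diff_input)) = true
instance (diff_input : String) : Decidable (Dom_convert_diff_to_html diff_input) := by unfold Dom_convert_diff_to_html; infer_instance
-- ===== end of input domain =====

-- B replaces A's four sequential full-string .replace passes by a single left-to-right scan with a
-- marker→tag table (same return value; objective: alternative, not claimed faster).

-- ===== PORT A =====
def convert_diff_to_html (diff_input : String) : String :=
  let diff_input := PySem.Str.strip diff_input
  let html_output : List String := ["<pre style=\"color: gray\">"]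
  let html_output := (PySem.Str.splitlines diff_input).foldl (fun html_output line =>
    let converted_line := line
    -- Handle deletions marked by [- -]
    let converted_line := PySem.Str.replace (PySem.Str.replace converted_line "[-" "<s style=\"color: red\">") "-]" "</s>"
    -- Handle additions marked by {+ +}
    let converted_line := PySem.Str.replace (PySem.Str.replace converted_line "{+" "<b style=\"color: green\">") "+}" "</b>"
    html_output ++ [converted_line]) html_output
  PySem.Str.join "\n" (html_output ++ ["</pre>"])

-- ===== PORT B =====
def pvMAP : PySem.Dict (List Char) (List Char) :=
  PySem.Dict.ofList [
    ("[-".toList, "<s style=\"color: red\">".toList),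
    ("-]".toList, "</s>".toList),
    ("{+".toList, "<b style=\"color: green\">".toList),
    ("+}".toList, "</b>".toList)]

def pvSubst : List Char → List Char
  | [] => []
  | c :: t =>
    match pvMAP.get? ((c :: t).take 2) with
    | some rep => rep ++ pvSubst (t.drop 1)
    | none => c :: pvSubst t
termination_by l => l.length
decreasing_by
  · simp only [List.length_drop, List.length_cons]; omega
  · simp only [List.length_cons]; omega

def convert_diff_to_html_alt (diff_input : String) : String :=
  let lines := PySem.Str.splitlines (PySem.Str.strip diff_input)
  let parts : List String :=
    ["<pre style=\"color: gray\">"] ++ lines.map (fun line => String.ofList (pvSubst line.toList)) ++ ["</pre>"]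
  PySem.Str.join "\n" parts

-- ===== PRECONDITION & SPEC =====
def Spec_convert_diff_to_html (diff_input : String) (out : String) : Prop := out = convert_diff_to_html_alt diff_input
instance (diff_input : String) (out : String) : Decidable (Spec_convert_diff_to_html diff_input out) := by unfold Spec_convert_diff_to_html; infer_instance

-- ===== CLAIM (what is proved, stated in full; the proofs are below) =====
def Claim_equal_convert_diff_to_html : Prop := ∀ (diff_input : String), Dom_convert_diff_to_html diff_input → Spec_convert_diff_to_html diff_input (convert_diff_to_html diff_input)

-- ===== LEMMAS AND PROOFS =====

lemma pvGoZero (old new l acc : List Char) :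
    PySem.Chars.replace.go old new 0 l acc = acc.reverse ++ l := by
  rw [PySem.Chars.replace.go]

lemma pvGoNil (old new : List Char) (fuel : Nat) (acc : List Char) :
    PySem.Chars.replace.go old new fuel [] acc = acc.reverse := by
  cases fuel with
  | zero => rw [PySem.Chars.replace.go]; simp
  | succ n => rw [PySem.Chars.replace.go]; omega

lemma pvGoSucc (old new : List Char) (fuel : Nat) (c : Char) (t acc : List Char) :
    PySem.Chars.replace.go old new (fuel+1) (c::t) acc =
      if old.isPrefixOf (c::t) then PySem.Chars.replace.go old new fuel (List.drop old.length (c::t)) (new.reverse ++ acc)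
      else PySem.Chars.replace.go old new fuel t (c :: acc) := by
  rw [PySem.Chars.replace.go]

lemma pvReplaceDef (p q c : Char) (t new : List Char) :
    PySem.Chars.replace (c::t) [p,q] new = PySem.Chars.replace.go [p,q] new (t.length+1) (c::t) [] := by
  rw [PySem.Chars.replace]; simp

lemma pvGoSpec (p q : Char) (new : List Char) :
    ∀ fuel l acc, l.length ≤ fuel →
      PySem.Chars.replace.go [p,q] new fuel l acc = acc.reverse ++ PySem.Chars.replace l [p,q] new := by
  intro fuel
  induction fuel using Nat.strong_induction_on with
  | _ fuel ih =>
    intro l acc h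
    cases fuel with
    | zero =>
      have : l = [] := by cases l <;> simp_all
      subst this
      rw [pvGoZero, PySem.Chars.replace]; simp [pvGoZero]
    | succ n =>
      cases l with
      | nil => rw [pvGoNil, PySem.Chars.replace]; simp [pvGoZero]
      | cons c t =>
        rw [pvGoSucc, pvReplaceDef, pvGoSucc]
        by_cases hp : List.isPrefixOf [p,q] (c::t) = true
        · simp only [hp, if_pos]
          rw [ih n (by omega) _ _ (by simp only [List.length_drop, List.length_cons] at h ⊢; omega),
              ih t.length (by simp only [List.length_cons] at h; omega) _ _ (by simp only [List.length_drop, List.length_cons]; omega)]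
          simp
        · simp only [Bool.not_eq_true] at hp
          simp only [hp, Bool.false_eq_true, if_neg, not_false_iff]
          rw [ih n (by omega) _ _ (by simp only [List.length_cons] at h; omega),
              ih t.length (by simp only [List.length_cons] at h; omega) _ _ (by simp)]
          simp

lemma pvReplaceNil (p q : Char) (new : List Char) :
    PySem.Chars.replace [] [p,q] new = [] := by
  rw [PySem.Chars.replace]; simp [pvGoZero]

lemma pvReplaceConsPos (p q c : Char) (t new : List Char) (h : List.isPrefixOf [p,q] (c::t) = true) :
    PySem.Chars.replace (c::t) [p,q] new = new ++ PySem.Chars.replace (t.drop 1) [p,q] new := by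
  rw [pvReplaceDef, pvGoSucc]
  simp only [h, if_pos]
  rw [pvGoSpec p q new _ _ _ (by simp only [List.length_drop, List.length_cons]; omega)]
  simp

lemma pvReplaceConsNeg (p q c : Char) (t new : List Char) (h : List.isPrefixOf [p,q] (c::t) = false) :
    PySem.Chars.replace (c::t) [p,q] new = c :: PySem.Chars.replace t [p,q] new := by
  rw [pvReplaceDef, pvGoSucc]
  simp only [h, Bool.false_eq_true, if_neg, not_false_iff]
  rw [pvGoSpec p q new _ _ _ (by simp)]
  simp

lemma pvReplaceAppend (p q : Char) (new pre x : List Char) (h : p ∉ pre) :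
    PySem.Chars.replace (pre ++ x) [p,q] new = pre ++ PySem.Chars.replace x [p,q] new := by
  induction pre with
  | nil => simp
  | cons c cs ih =>
    have hc : p ≠ c := by intro e; exact h (e ▸ List.mem_cons_self)
    have : List.isPrefixOf [p,q] (c :: (cs ++ x)) = false := by
      simp [List.isPrefixOf, hc]
    rw [List.cons_append, pvReplaceConsNeg _ _ _ _ _ this, ih (fun m => h (List.mem_cons_of_mem _ m))]
    simp

lemma pvReplaceNeNil (p q : Char) (new : List Char) (hn : new ≠ []) (y : List Char) (hy : y ≠ []) :
    PySem.Chars.replace y [p,q] new ≠ [] := by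
  obtain ⟨c, t, rfl⟩ : ∃ c t, y = c :: t := by cases y with | nil => exact absurd rfl hy | cons c t => exact ⟨c, t, rfl⟩
  by_cases hp : List.isPrefixOf [p,q] (c::t) = true
  · rw [pvReplaceConsPos _ _ _ _ _ hp]
    cases new with
    | nil => exact absurd rfl hn
    | cons d ds => simp
  · rw [pvReplaceConsNeg _ _ _ _ _ (by simp only [Bool.not_eq_true] at hp; exact hp)]
    simp

lemma pvReplaceHead (p q : Char) (new : List Char) (hn : new ≠ []) (y : List Char) (hy : y ≠ []) :
    (PySem.Chars.replace y [p,q] new).head? = new.head? ∨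
      (PySem.Chars.replace y [p,q] new).head? = y.head? := by
  obtain ⟨c, t, rfl⟩ : ∃ c t, y = c :: t := by cases y with | nil => exact absurd rfl hy | cons c t => exact ⟨c, t, rfl⟩
  by_cases hp : List.isPrefixOf [p,q] (c::t) = true
  · left
    rw [pvReplaceConsPos _ _ _ _ _ hp]
    cases new with
    | nil => exact absurd rfl hn
    | cons d ds => simp
  · right
    rw [pvReplaceConsNeg _ _ _ _ _ (by simp only [Bool.not_eq_true] at hp; exact hp)]
    simp

lemma pvMapGetPair (a b : Char) :
    pvMAP.get? [a, b] =
      if a = '[' ∧ b = '-' then some "<s style=\"color: red\">".toList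
      else if a = '-' ∧ b = ']' then some "</s>".toList
      else if a = '{' ∧ b = '+' then some "<b style=\"color: green\">".toList
      else if a = '+' ∧ b = '}' then some "</b>".toList
      else none := by
  have : pvMAP = PySem.Dict.mk [
    (['[','-'], "<s style=\"color: red\">".toList),
    (['-',']'], "</s>".toList),
    (['{','+'], "<b style=\"color: green\">".toList),
    (['+','}'], "</b>".toList)] := by decide
  rw [this]
  simp only [PySem.Dict.get?_mk_cons]
  have hemp : (PySem.Dict.mk ([] : List (List Char × List Char))).get? [a,b] = none := rfl
  rw [hemp]
  simp only [List.cons_beq_cons, beq_iff_eq, Bool.and_eq_true, and_true]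
  simp only [@eq_comm Char '[' a, @eq_comm Char '-' b, @eq_comm Char '-' a,
    @eq_comm Char ']' b, @eq_comm Char '{' a, @eq_comm Char '+' b,
    @eq_comm Char '+' a, @eq_comm Char '}' b]

lemma pvMapGetSingle (a : Char) : pvMAP.get? [a] = none := by
  have : pvMAP = PySem.Dict.mk [
    (['[','-'], "<s style=\"color: red\">".toList),
    (['-',']'], "</s>".toList),
    (['{','+'], "<b style=\"color: green\">".toList),
    (['+','}'], "</b>".toList)] := by decide
  rw [this]
  simp [PySem.Dict.get?_mk_cons, List.cons_beq_cons]
  rfl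


lemma pvPrefixFalseFst (p q a : Char) (t : List Char) (h : p ≠ a) :
    List.isPrefixOf [p,q] (a :: t) = false := by
  simp [List.isPrefixOf, h]

lemma pvPrefixFalseShort (p q a : Char) : List.isPrefixOf [p,q] [a] = false := by
  simp [List.isPrefixOf]

lemma pvPairPrefixFalse (p q a b : Char) (t : List Char) (h : ¬(a = p ∧ b = q)) :
    List.isPrefixOf [p,q] (a :: b :: t) = false := by
  by_cases hap : a = p
  · subst hap
    have hbq : ¬ q = b := fun e => h ⟨rfl, e.symm⟩
    simp [List.isPrefixOf, hbq]
  · exact pvPrefixFalseFst _ _ _ _ (fun e => hap e.symm)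

lemma pvPairPrefixTrue (p q : Char) (t : List Char) :
    List.isPrefixOf [p,q] (p :: q :: t) = true := by
  simp [List.isPrefixOf]

lemma pvChainAux : ∀ (n : Nat) (l : List Char), l.length ≤ n →
    PySem.Chars.replace (PySem.Chars.replace (PySem.Chars.replace (PySem.Chars.replace l
        ['[','-'] "<s style=\"color: red\">".toList)
        ['-',']'] "</s>".toList)
        ['{','+'] "<b style=\"color: green\">".toList)
        ['+','}'] "</b>".toList = pvSubst l := by
  intro n
  induction n with
  | zero =>
    intro l h
    have : l = [] := by cases l <;> simp_all
    subst this
    simp [pvReplaceNil, pvSubst]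
  | succ n ih =>
    intro l h
    match l with
    | [] => simp [pvReplaceNil, pvSubst]
    | [a] =>
      have hni : ∀ (p q : Char) (new : List Char), PySem.Chars.replace [a] [p,q] new = [a] := by
        intro p q new
        rw [pvReplaceConsNeg _ _ _ _ _ (pvPrefixFalseShort p q a), pvReplaceNil]
      rw [hni, hni, hni, hni]
      simp [pvSubst, pvMapGetSingle]
    | a :: b :: t =>
      have ht : t.length ≤ n := by simp only [List.length_cons] at h; omega
      have hbt : (b :: t).length ≤ n := by simp only [List.length_cons] at h ⊢; omega
      by_cases c1 : a = '[' ∧ b = '-'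
      · obtain ⟨rfl, rfl⟩ := c1
        rw [pvReplaceConsPos '[' '-' '[' ('-'::t) _ (pvPairPrefixTrue _ _ _)]
        simp only [List.drop_succ_cons, List.drop_zero]
        rw [pvReplaceAppend _ _ _ _ _ (by decide),
            pvReplaceAppend _ _ _ _ _ (by decide),
            pvReplaceAppend _ _ _ _ _ (by decide)]
        rw [ih t ht]
        simp [pvSubst, show pvMAP.get? ['[','-'] = some "<s style=\"color: red\">".toList from by decide]
      · by_cases c2 : a = '-' ∧ b = ']'
        · obtain ⟨rfl, rfl⟩ := c2
          rw [pvReplaceConsNeg '[' '-' '-' (']'::t) _ (pvPrefixFalseFst _ _ _ _ (by decide)),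
              pvReplaceConsNeg '[' '-' ']' t _ (pvPrefixFalseFst _ _ _ _ (by decide))]
          rw [pvReplaceConsPos '-' ']' '-' (']' :: PySem.Chars.replace t ['[','-'] "<s style=\"color: red\">".toList) _ (pvPairPrefixTrue _ _ _)]
          simp only [List.drop_succ_cons, List.drop_zero]
          rw [pvReplaceAppend _ _ _ _ _ (by decide),
              pvReplaceAppend _ _ _ _ _ (by decide)]
          rw [ih t ht]
          simp [pvSubst, show pvMAP.get? ['-',']'] = some "</s>".toList from by decide]
        · by_cases c3 : a = '{' ∧ b = '+'
          · obtain ⟨rfl, rfl⟩ := c3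
            rw [pvReplaceConsNeg '[' '-' '{' ('+'::t) _ (pvPrefixFalseFst _ _ _ _ (by decide)),
                pvReplaceConsNeg '[' '-' '+' t _ (pvPrefixFalseFst _ _ _ _ (by decide))]
            rw [pvReplaceConsNeg '-' ']' '{' ('+' :: PySem.Chars.replace t ['[','-'] "<s style=\"color: red\">".toList) _ (pvPrefixFalseFst _ _ _ _ (by decide)),
                pvReplaceConsNeg '-' ']' '+' (PySem.Chars.replace t ['[','-'] "<s style=\"color: red\">".toList) _ (pvPrefixFalseFst _ _ _ _ (by decide))]
            rw [pvReplaceConsPos '{' '+' '{' ('+' :: PySem.Chars.replace (PySem.Chars.replace t ['[','-'] "<s style=\"color: red\">".toList) ['-',']'] "</s>".toList) _ (pvPairPrefixTrue _ _ _)]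
            simp only [List.drop_succ_cons, List.drop_zero]
            rw [pvReplaceAppend _ _ _ _ _ (by decide)]
            rw [ih t ht]
            simp [pvSubst, show pvMAP.get? ['{','+'] = some "<b style=\"color: green\">".toList from by decide]
          · by_cases c4 : a = '+' ∧ b = '}'
            · obtain ⟨rfl, rfl⟩ := c4
              rw [pvReplaceConsNeg '[' '-' '+' ('}'::t) _ (pvPrefixFalseFst _ _ _ _ (by decide)),
                  pvReplaceConsNeg '[' '-' '}' t _ (pvPrefixFalseFst _ _ _ _ (by decide))]
              rw [pvReplaceConsNeg '-' ']' '+' ('}' :: PySem.Chars.replace t ['[','-'] "<s style=\"color: red\">".toList) _ (pvPrefixFalseFst _ _ _ _ (by decide)),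
                  pvReplaceConsNeg '-' ']' '}' (PySem.Chars.replace t ['[','-'] "<s style=\"color: red\">".toList) _ (pvPrefixFalseFst _ _ _ _ (by decide))]
              rw [pvReplaceConsNeg '{' '+' '+' ('}' :: PySem.Chars.replace (PySem.Chars.replace t ['[','-'] "<s style=\"color: red\">".toList) ['-',']'] "</s>".toList) _ (pvPrefixFalseFst _ _ _ _ (by decide)),
                  pvReplaceConsNeg '{' '+' '}' (PySem.Chars.replace (PySem.Chars.replace t ['[','-'] "<s style=\"color: red\">".toList) ['-',']'] "</s>".toList) _ (pvPrefixFalseFst _ _ _ _ (by decide))]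
              rw [pvReplaceConsPos '+' '}' '+' ('}' :: PySem.Chars.replace (PySem.Chars.replace (PySem.Chars.replace t ['[','-'] "<s style=\"color: red\">".toList) ['-',']'] "</s>".toList) ['{','+'] "<b style=\"color: green\">".toList) _ (pvPairPrefixTrue _ _ _)]
              simp only [List.drop_succ_cons, List.drop_zero]
              rw [ih t ht]
              simp [pvSubst, show pvMAP.get? ['+','}'] = some "</b>".toList from by decide]
            · -- default: no marker starts at the head
              have hpass : ∀ (p q : Char) (Z : List Char),
                  (Z.head? = some '<' ∨ Z.head? = some b) → ¬(a = p ∧ b = q) → q ≠ '<' →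
                  List.isPrefixOf [p,q] (a :: Z) = false := by
                intro p q Z hZ hnb hq
                by_cases hap : a = p
                · subst hap
                  have hbq : b ≠ q := fun e => hnb ⟨rfl, e⟩
                  cases Z with
                  | nil => exact pvPrefixFalseShort _ _ _
                  | cons z zs =>
                    have hz : ¬ (z = q) := by
                      rcases hZ with hh | hh <;> simp only [List.head?_cons, Option.some.injEq] at hh <;> subst hh
                      · exact fun e => hq e.symm
                      · exact hbq
                    exact pvPairPrefixFalse _ _ _ _ _ (fun e => hz e.2)
                · exact pvPrefixFalseFst _ _ _ _ (fun e => hap e.symm)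
              have hc1 : List.isPrefixOf ['[','-'] (a :: b :: t) = false := pvPairPrefixFalse _ _ _ _ _ c1
              rw [pvReplaceConsNeg '[' '-' a (b::t) _ hc1]
              set Y := PySem.Chars.replace (b :: t) ['[','-'] "<s style=\"color: red\">".toList with hYdef
              have hYhead : Y.head? = some '<' ∨ Y.head? = some b := by
                rcases pvReplaceHead '[' '-' "<s style=\"color: red\">".toList (by decide) (b :: t) (by simp) with hh | hh
                · left; rw [hYdef, hh]; rfl
                · right; rw [hYdef, hh]; rfl
              rw [pvReplaceConsNeg '-' ']' a Y _ (hpass '-' ']' Y hYhead c2 (by decide))]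
              set Z := PySem.Chars.replace Y ['-',']'] "</s>".toList with hZdef
              have hYne : Y ≠ [] := pvReplaceNeNil '[' '-' _ (by decide) (b :: t) (by simp)
              have hZhead : Z.head? = some '<' ∨ Z.head? = some b := by
                rcases pvReplaceHead '-' ']' "</s>".toList (by decide) Y hYne with hh | hh
                · left; rw [hZdef, hh]; rfl
                · rw [hZdef, hh]; exact hYhead
              rw [pvReplaceConsNeg '{' '+' a Z _ (hpass '{' '+' Z hZhead c3 (by decide))]
              set W := PySem.Chars.replace Z ['{','+'] "<b style=\"color: green\">".toList with hWdef
              have hZne : Z ≠ [] := pvReplaceNeNil '-' ']' _ (by decide) Y hYne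
              have hWhead : W.head? = some '<' ∨ W.head? = some b := by
                rcases pvReplaceHead '{' '+' "<b style=\"color: green\">".toList (by decide) Z hZne with hh | hh
                · left; rw [hWdef, hh]; rfl
                · rw [hWdef, hh]; exact hZhead
              rw [pvReplaceConsNeg '+' '}' a W _ (hpass '+' '}' W hWhead c4 (by decide))]
              have hsub : pvSubst (a :: b :: t) = a :: pvSubst (b :: t) := by
                have hnone : pvMAP.get? [a, b] = none := by
                  rw [pvMapGetPair]
                  simp [c1, c2, c3, c4]
                simp [pvSubst, hnone]
              rw [hsub, hWdef, hZdef, hYdef, ih (b :: t) hbt]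

lemma pvLineEq (line : String) :
    PySem.Str.replace (PySem.Str.replace (PySem.Str.replace (PySem.Str.replace line
      "[-" "<s style=\"color: red\">") "-]" "</s>") "{+" "<b style=\"color: green\">") "+}" "</b>"
      = String.ofList (pvSubst line.toList) := by
  apply String.toList_inj.mp
  simp only [PySem.Str.toList_replace]
  have e1 : "[-".toList = ['[','-'] := rfl
  have e2 : "-]".toList = ['-',']'] := rfl
  have e3 : "{+".toList = ['{','+'] := rfl
  have e4 : "+}".toList = ['+','}'] := rfl
  rw [e1, e2, e3, e4]
  rw [pvChainAux line.toList.length line.toList le_rfl]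
  simp

-- ===== VERDICT (by name: the statement is the Claim_ definition above) =====
theorem convert_diff_to_html_spec : Claim_equal_convert_diff_to_html := by
  intro diff_input _
  unfold Spec_convert_diff_to_html convert_diff_to_html convert_diff_to_html_alt
  show PySem.Str.join "\n" (List.foldl (fun acc line => acc ++
        [PySem.Str.replace (PySem.Str.replace (PySem.Str.replace (PySem.Str.replace line
          "[-" "<s style=\"color: red\">") "-]" "</s>") "{+" "<b style=\"color: green\">") "+}" "</b>"])
        ["<pre style=\"color: gray\">"] (PySem.Str.splitlines (PySem.Str.strip diff_input)) ++ ["</pre>"])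
      = PySem.Str.join "\n" (["<pre style=\"color: gray\">"] ++
        List.map (fun line => String.ofList (pvSubst line.toList)) (PySem.Str.splitlines (PySem.Str.strip diff_input)) ++ ["</pre>"])
  rw [PySem.List.foldl_append_singleton_eq_map]
  simp only [pvLineEq]
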